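-- pv_equiv track=rewrite | github.com/tomrudnick/four-in-a-row | fourInARow.py | search_for_three
-- ===== SOURCE A (Python) =====
-- def search_for_three(pieces, player):
--     four_minus_one_counter = 0
--     free_piece = -1
--
--     for piece in range(len(pieces)):
--         if pieces[piece] == player:
--             four_minus_one_counter += 1
--         elif pieces[piece] == 0:
--             free_piece = piece
--         else:
--             return -1
--
--     if four_minus_one_counter == 3:
--         return free_piece
--     else:
--         return -1
-- ===== SOURCE B (Python) =====
-- def search_for_three(pieces, player):
--     # validation pass: any opponent piece kills the line
--     if not all(p == player or p == 0 for p in pieces):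
--         return -1
--     # free slot = LAST empty index (-1 if none)
--     free = -1
--     for i, p in enumerate(pieces):
--         if p == 0:
--             free = i
--     return free if pieces.count(player) == 3 else -1
-- ===== Notes on version B (the rewrite author's own statement) =====
-- stated objective: simpler
-- what changed: Replaces the fused early-exit counter loop by three separate scans (an all() validation pass, a last-zero-index scan, a count(player) check); Pre_ excludes player == 0, where the player id coincides with the empty-cell marker and A's and B's readings of a zero cell are both defensible.
-- outside the precondition, e.g. on search_for_three([0, 0, 0], 0): A returns -1, B returns 2
import Mathlib
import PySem

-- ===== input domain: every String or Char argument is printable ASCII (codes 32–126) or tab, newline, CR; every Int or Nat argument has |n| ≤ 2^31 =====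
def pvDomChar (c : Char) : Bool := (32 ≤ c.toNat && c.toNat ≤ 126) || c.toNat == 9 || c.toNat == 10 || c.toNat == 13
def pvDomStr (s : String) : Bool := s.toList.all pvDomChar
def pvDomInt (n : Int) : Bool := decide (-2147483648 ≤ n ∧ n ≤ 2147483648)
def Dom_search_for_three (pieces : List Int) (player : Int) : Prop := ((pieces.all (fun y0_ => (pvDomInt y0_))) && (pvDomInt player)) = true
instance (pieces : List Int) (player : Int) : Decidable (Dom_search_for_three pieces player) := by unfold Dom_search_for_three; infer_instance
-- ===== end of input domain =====

-- ===== PORT A =====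
-- B splits A's fused loop into three separate scans; return-value equivalence proved for player ≠ 0
-- (player 0 coincides with the empty-cell marker, an unspecified corner excluded by Pre_).
-- Literal port of A: one loop carrying the index, the player counter and the last free index, with early return.
def search_for_three_go (player : Int) : List Int → Int → Int → Int → Int
  | [], _, counter, free => if counter == 3 then free else -1
  | p :: rest, i, counter, free =>
      if p == player then search_for_three_go player rest (i + 1) (counter + 1) free
      else if p == 0 then search_for_three_go player rest (i + 1) counter i
      else -1

def search_for_three (pieces : List Int) (player : Int) : Int :=
  search_for_three_go player pieces 0 0 (-1)

-- ===== PORT B =====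
def search_for_three_alt (pieces : List Int) (player : Int) : Int :=
  if !(pieces.all (fun p => p == player || p == 0)) then -1
  else
    let free := (PySem.List.enumerate pieces 0).foldl
      (fun acc ip => if ip.2 == 0 then ip.1 else acc) (-1)
    if PySem.List.count pieces player == 3 then free else -1

-- ===== PRECONDITION & SPEC =====
-- Pre_ excludes player == 0: the player id then coincides with the empty-cell marker 0, so
-- 'own piece' and 'free slot' are indistinguishable and A's reading (zeros are the player's
-- pieces) and B's reading (zeros are free slots) are both defensible on this unspecified corner.
def Pre_search_for_three (pieces : List Int) (player : Int) : Prop := player ≠ 0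
instance (pieces : List Int) (player : Int) : Decidable (Pre_search_for_three pieces player) := by
  unfold Pre_search_for_three; infer_instance
def pvWitness_search_for_three : List Int × Int := ([1, 1, 0, 1], 1)
def Spec_search_for_three (pieces : List Int) (player : Int) (out : Int) : Prop := out = search_for_three_alt pieces player
instance (pieces : List Int) (player : Int) (out : Int) : Decidable (Spec_search_for_three pieces player out) := by unfold Spec_search_for_three; infer_instance

-- ===== CLAIM (what is proved, stated in full; the proofs are below) =====
def Claim_equal_search_for_three : Prop := ∀ (pieces : List Int) (player : Int), Dom_search_for_three pieces player → Pre_search_for_three pieces player → Spec_search_for_three pieces player (search_for_three pieces player)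

-- ===== LEMMAS AND PROOFS =====

-- Loop invariant: for player ≠ 0 the fused loop equals validation + counting + last-zero fold.
theorem go_eq (player : Int) (hp : player ≠ 0) :
    ∀ (rest : List Int) (i counter free : Int),
    search_for_three_go player rest i counter free =
      if rest.all (fun p => p == player || p == 0) then
        (if counter + (rest.count player : Int) == 3 then
          (PySem.List.enumerate rest i).foldl
            (fun acc ip => if ip.2 == 0 then ip.1 else acc) free
        else -1)
      else -1 := by
  intro rest
  induction rest with
  | nil => intro i counter free; simp [search_for_three_go]
  | cons p rest ih =>
    intro i counter free
    by_cases h1 : p = player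
    · subst h1
      have hz : (p == (0:Int)) = false := by simp [hp]
      simp [search_for_three_go, hz, ih, PySem.List.enumerate_cons, hp]
      ring_nf
    · by_cases h2 : p = 0
      · subst h2
        simp [search_for_three_go, ih, PySem.List.enumerate_cons, Ne.symm hp]
      · simp [search_for_three_go, h1, h2]

theorem search_for_three_spec : Claim_equal_search_for_three := by
  intro pieces player _ hp
  unfold Spec_search_for_three search_for_three search_for_three_alt
  rw [go_eq player hp]
  by_cases hall : pieces.all (fun p => p == player || p == 0)
  · rcases eq_or_ne (pieces.count player) 3 with hc | hc
    · simp [hall, PySem.List.count_eq, hc]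
    · have hc' : ((pieces.count player : Int)) ≠ 3 := by exact_mod_cast hc
      simp [hall, PySem.List.count_eq, hc, hc']
  · simp [hall]
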